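-- pv_equiv track=rewrite | github.com/tal-sharon/intro2cs | ex04/main.py | right_letter_score
-- ===== SOURCE A (Python) =====
-- def right_letter_score(correct_word: str, guessed_letter: str, score: int) -> int:
--     """
--     adding points to the player after guessing the word right
--     :param correct_word: the current word being guessed
--     :param guessed_letter: the already wrong guessed letters
--     :param score: the current points of the player
--     :return: the updated sum of total points of the player
--     """
--     letter_counter = 0
--     for letter in correct_word:
--         if guessed_letter == letter:
--             letter_counter += 1
--     n = letter_counter
--     new_points = (n * (n + 1)) // 2
--     score += new_points
--     return score
-- ===== SOURCE B (Python) =====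
-- def right_letter_score(correct_word: str, guessed_letter: str, score: int) -> int:
--     count = 0
--     total = 0
--     for letter in correct_word:
--         if guessed_letter == letter:
--             count += 1
--             total += count
--     return score + total
-- ===== Notes on version B (the rewrite author's own statement) =====
-- stated objective: alternative
-- what changed: B accumulates the triangular score incrementally (adding the new count on each match) in a single fused loop instead of counting matches first and applying the closed-form n*(n+1)//2.
import Mathlib
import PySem

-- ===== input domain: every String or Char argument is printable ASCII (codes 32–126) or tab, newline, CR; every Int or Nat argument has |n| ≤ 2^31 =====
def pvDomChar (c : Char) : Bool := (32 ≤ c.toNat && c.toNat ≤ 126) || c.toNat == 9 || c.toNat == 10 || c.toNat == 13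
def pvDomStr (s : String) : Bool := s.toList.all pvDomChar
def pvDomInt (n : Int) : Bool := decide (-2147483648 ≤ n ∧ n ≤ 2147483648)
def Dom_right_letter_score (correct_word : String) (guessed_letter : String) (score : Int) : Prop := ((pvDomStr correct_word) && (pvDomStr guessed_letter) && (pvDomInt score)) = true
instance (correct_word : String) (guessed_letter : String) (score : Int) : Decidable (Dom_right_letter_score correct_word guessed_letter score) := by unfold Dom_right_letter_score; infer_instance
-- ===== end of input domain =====

-- ===== PORT A =====
-- A: count matching letters, then add the closed-form triangular number n*(n+1)//2 to score.
def right_letter_score (correct_word : String) (guessed_letter : String) (score : Int) : Int :=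
  let letter_counter : Int :=
    correct_word.toList.foldl
      (fun acc letter => if guessed_letter == String.ofList [letter] then acc + 1 else acc) 0
  let n := letter_counter
  let new_points := PySem.Int.floordiv (n * (n + 1)) 2
  score + new_points

-- ===== PORT B =====
-- B: single fused loop keeping a running count and running triangular total.
def right_letter_score_alt (correct_word : String) (guessed_letter : String) (score : Int) : Int :=
  let r :=
    correct_word.toList.foldl
      (fun (p : Int × Int) letter =>
        if guessed_letter == String.ofList [letter] then (p.1 + 1, p.2 + (p.1 + 1)) else p)
      (0, 0)
  score + r.2

-- ===== PRECONDITION & SPEC =====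
def Spec_right_letter_score (correct_word : String) (guessed_letter : String) (score : Int) (out : Int) : Prop := out = right_letter_score_alt correct_word guessed_letter score
instance (correct_word : String) (guessed_letter : String) (score : Int) (out : Int) : Decidable (Spec_right_letter_score correct_word guessed_letter score out) := by unfold Spec_right_letter_score; infer_instance

-- ===== CLAIM (what is proved, stated in full; the proofs are below) =====
def Claim_equal_right_letter_score : Prop := ∀ (correct_word : String) (guessed_letter : String) (score : Int), Dom_right_letter_score correct_word guessed_letter score → Spec_right_letter_score correct_word guessed_letter score (right_letter_score correct_word guessed_letter score)

-- ===== LEMMAS AND PROOFS =====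

-- ===== VERDICT (by name: the statement is the Claim_ definition above) =====
private lemma rls_key (gl : String) : ∀ (l : List Char) (c t : Int), 0 ≤ c → 2 * t = c * (c + 1) →
    (List.foldl
      (fun (p : Int × Int) letter =>
        if gl == String.ofList [letter] then (p.1 + 1, p.2 + (p.1 + 1)) else p)
      (c, t) l)
    = (let n := List.foldl (fun acc letter => if gl == String.ofList [letter] then acc + 1 else acc) c l;
       (n, PySem.Int.floordiv (n * (n + 1)) 2)) := by
  intro l
  induction l with
  | nil =>
    intro c t hc ht
    simp only [List.foldl]
    have hd : PySem.Int.floordiv (c * (c + 1)) 2 = t := by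
      rw [PySem.Int.floordiv_eq_ediv_of_pos (by omega)]
      omega
    rw [hd]
  | cons x xs ih =>
    intro c t hc ht
    simp only [List.foldl]
    by_cases h : gl == String.ofList [x]
    · simp only [h, if_pos]
      exact ih (c + 1) (t + (c + 1)) (by omega) (by ring_nf; linarith [ht])
    · simp only [h]
      exact ih c t hc ht

theorem right_letter_score_spec : Claim_equal_right_letter_score := by
  intro cw gl s _
  unfold Spec_right_letter_score right_letter_score right_letter_score_alt
  rw [rls_key gl cw.toList 0 0 (by omega) (by ring)]
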